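-- pv_equiv track=rewrite | github.com/MarcoGuzBal/DooleyHelpz | scripts/clean_prereq.py | parse_and_normalize
-- ===== SOURCE A (Python) =====
-- from typing import List
--
-- def parse_and_normalize(tokens):
--     # convert to postfix
--     prec = {'AND': 2, 'OR': 1} # operator precedence: AND > OR
--     output = []
--     ops = []
--     for t in tokens:
--         if t in ('AND', 'OR'):
--             while ops and ops[-1] != '(' and prec[ops[-1]] >= prec[t]:
--                 output.append(ops.pop())
--             ops.append(t)
--         elif t == '(':
--             ops.append(t)
--         elif t == ')':
--             while ops and ops[-1] != '(':
--                 output.append(ops.pop())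
--             if not ops:
--                 raise ValueError("unmatched brackets, lack of '('")
--             ops.pop()
--         else: # course name
--             output.append(t)
--     while ops:
--         op = ops.pop()
--         if op in ('(', ')'):
--             raise ValueError("unmatched brackets")
--         output.append(op)
--
--     # get cnf
--     def merge_or_clause(ca: List[str], cb: List[str]) -> List[str]:
--         seen = set()
--         merged = []
--         for x in ca + cb:
--             if x not in seen:
--                 seen.add(x)
--                 merged.append(x)
--         return merged
--
--     stack = []
--     for t in output:
--         if t not in ('AND', 'OR'):
--             stack.append([[t]])
--         else:
--             if len(stack) < 2:
--                 raise ValueError("表达式错误：操作数不足")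
--             b = stack.pop()
--             a = stack.pop()
--             if t == 'AND':
--                 stack.append(a + b)
--             else:  # OR
--                 # distributive law!
--                 res = []
--                 for ca in a:
--                     for cb in b:
--                         res.append(merge_or_clause(ca, cb))
--                 stack.append(res)
--
--     if len(stack) != 1:
--         raise ValueError("Error in expression")
--     return stack[0]
-- ===== SOURCE B (Python) =====
-- def parse_and_normalize(tokens):
--     # Recursive-descent parser building CNF bottom-up (no postfix pass).
--     def merge(ca, cb):
--         seen = set()
--         merged = []
--         for x in ca + cb:
--             if x not in seen:
--                 seen.add(x)
--                 merged.append(x)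
--         return merged
--
--     def parse_atom(i):
--         if i >= len(tokens):
--             raise ValueError("Error in expression")
--         t = tokens[i]
--         if t == '(':
--             cnf, i = parse_or(i + 1)
--             if i >= len(tokens) or tokens[i] != ')':
--                 raise ValueError("unmatched brackets")
--             return cnf, i + 1
--         if t in ('AND', 'OR', ')'):
--             raise ValueError("Error in expression")
--         return [[t]], i + 1
--
--     def parse_and(i):
--         cnf, i = parse_atom(i)
--         while i < len(tokens) and tokens[i] == 'AND':
--             rhs, i = parse_atom(i + 1)
--             cnf = cnf + rhs
--         return cnf, i
--
--     def parse_or(i):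
--         cnf, i = parse_and(i)
--         while i < len(tokens) and tokens[i] == 'OR':
--             rhs, i = parse_and(i + 1)
--             cnf = [merge(ca, cb) for ca in cnf for cb in rhs]
--         return cnf, i
--
--     cnf, i = parse_or(0)
--     if i != len(tokens):
--         raise ValueError("Error in expression")
--     return cnf
-- ===== Notes on version B (the rewrite author's own statement) =====
-- stated objective: alternative
-- what changed: Replaced the two-phase shunting-yard (infix-to-postfix conversion followed by a postfix stack evaluation) by a one-phase recursive-descent parser (parse_or/parse_and/parse_atom over a position index) that builds the CNF bottom-up during the descent; Pre_ restricts the claim to well-formed infix expressions, because A's unvalidated shunting-yard also happens to accept some malformed inputs (postfix/prefix-style operator placement, empty '()' groups) on which a descent parser naturally raises.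
-- outside the precondition, e.g. on parse_and_normalize(['x', 'y', 'AND']): A returns [['x'], ['y']], B raises ValueError; on parse_and_normalize(['x', 'AND', '(', ')', 'y']): A returns [['x'], ['y']], B raises ValueError; on parse_and_normalize(['AND', 'x', 'y']): A returns [['x'], ['y']], B raises ValueError
import Mathlib
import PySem

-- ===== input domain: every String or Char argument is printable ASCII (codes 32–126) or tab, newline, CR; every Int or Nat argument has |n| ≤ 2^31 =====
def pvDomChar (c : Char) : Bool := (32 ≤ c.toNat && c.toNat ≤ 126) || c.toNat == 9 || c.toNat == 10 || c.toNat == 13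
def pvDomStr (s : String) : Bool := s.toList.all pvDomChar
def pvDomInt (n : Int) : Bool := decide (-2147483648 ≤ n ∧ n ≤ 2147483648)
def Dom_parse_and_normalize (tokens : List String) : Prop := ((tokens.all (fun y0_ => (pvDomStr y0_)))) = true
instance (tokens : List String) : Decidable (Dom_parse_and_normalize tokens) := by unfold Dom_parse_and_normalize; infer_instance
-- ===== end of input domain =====

-- B differs from A by algorithm (recursive descent building CNF directly, instead of
-- shunting-yard postfix conversion followed by postfix stack evaluation); equivalence is
-- claimed on well-formed infix expressions (Pre_), see the comment at Pre_parse_and_normalize.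

-- ===== PORT A =====
-- merge_or_clause: ordered union with a `seen` set (shared verbatim by both Pythons)
def pvMergeOr (ca cb : List String) : List String :=
  ((ca ++ cb).foldl
    (fun (st : PySem.Set String × List String) x =>
      if PySem.Set.contains st.1 x then st else (PySem.Set.add st.1 x, st.2 ++ [x]))
    (PySem.Set.empty, [])).2

def pvPrec (t : String) : Int := if t == "AND" then 2 else 1

-- while ops and ops[-1] != '(' and prec[ops[-1]] >= prec[t]: output.append(ops.pop())
-- (output is accumulated in reverse: head = most recently appended)
def pvPopGE (t : String) : List String → List String → List String × List String
  | out, [] => (out, [])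
  | out, o :: rest =>
    if o != "(" && pvPrec t ≤ pvPrec o then pvPopGE t (o :: out) rest else (out, o :: rest)

-- the ')' branch: pop to output until '('; none = raise (unmatched '(' missing)
def pvPopParen : List String → List String → Option (List String × List String)
  | _, [] => none
  | out, o :: rest => if o == "(" then some (out, rest) else pvPopParen (o :: out) rest

-- final while ops: none = raise "unmatched brackets"
def pvDrain : List String → List String → Option (List String)
  | out, [] => some out
  | out, o :: rest => if o == "(" || o == ")" then none else pvDrain (o :: out) rest

-- the main token loop; returns the postfix output in reverse order
def pvToPostfix : List String → List String → List String → Option (List String)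
  | [], out, ops => pvDrain out ops
  | t :: ts, out, ops =>
    if t == "AND" || t == "OR" then
      let p := pvPopGE t out ops
      pvToPostfix ts p.1 (t :: p.2)
    else if t == "(" then pvToPostfix ts out (t :: ops)
    else if t == ")" then
      match pvPopParen out ops with
      | none => none
      | some p => pvToPostfix ts p.1 p.2
    else pvToPostfix ts (t :: out) ops

-- the CNF stack loop over the postfix (in forward order); none = raise
def pvEvalPostfix : List String → List (List (List String)) → Option (List (List String))
  | [], stack => match stack with | [s] => some s | _ => none
  | t :: ts, stack =>
    if t == "AND" || t == "OR" then
      match stack with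
      | b :: a :: rest =>
        if t == "AND" then pvEvalPostfix ts ((a ++ b) :: rest)
        else
          pvEvalPostfix ts
            ((a.foldl (fun res ca => b.foldl (fun r2 cb => r2 ++ [pvMergeOr ca cb]) res) []) :: rest)
      | _ => none
    else pvEvalPostfix ts ([[t]] :: stack)

def parse_and_normalize (tokens : List String) : List (List String) :=
  match pvToPostfix tokens [] [] with
  | none => []
  | some revOut =>
    match pvEvalPostfix revOut.reverse [] with
    | none => []
    | some r => r

-- ===== PORT B =====
-- recursive descent over the remaining-token suffix (Python's index i ↦ tokens.drop i);
-- fuel only guarantees termination (3 per descent level, one level per consumed token)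
mutual
def pvParseAtom : Nat → List String → Option (List (List String) × List String)
  | 0, _ => none
  | _ + 1, [] => none
  | f + 1, t :: rest =>
    if t == "(" then
      match pvParseOr f rest with
      | some (c, ")" :: r2) => some (c, r2)
      | _ => none
    else if t == "AND" || t == "OR" || t == ")" then none
    else some ([[t]], rest)

def pvParseAnd : Nat → List String → Option (List (List String) × List String)
  | 0, _ => none
  | f + 1, ts =>
    match pvParseAtom f ts with
    | some (c, r) => pvParseAndLoop f c r
    | none => none

def pvParseAndLoop : Nat → List (List String) → List String → Option (List (List String) × List String)
  | 0, _, _ => none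
  | f + 1, c, "AND" :: r =>
    match pvParseAtom f r with
    | some (c2, r2) => pvParseAndLoop f (c ++ c2) r2
    | none => none
  | _ + 1, c, r => some (c, r)

def pvParseOr : Nat → List String → Option (List (List String) × List String)
  | 0, _ => none
  | f + 1, ts =>
    match pvParseAnd f ts with
    | some (c, r) => pvParseOrLoop f c r
    | none => none

def pvParseOrLoop : Nat → List (List String) → List String → Option (List (List String) × List String)
  | 0, _, _ => none
  | f + 1, c, "OR" :: r =>
    match pvParseAnd f r with
    | some (c2, r2) => pvParseOrLoop f (c.flatMap (fun ca => c2.map (fun cb => pvMergeOr ca cb))) r2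
    | none => none
  | _ + 1, c, r => some (c, r)
end

def parse_and_normalize_alt (tokens : List String) : List (List String) :=
  match pvParseOr (3 * tokens.length + 3) tokens with
  | some (c, []) => c
  | _ => []

-- ===== PRECONDITION & SPEC =====
-- token kinds: 0 = course name, 1 = operator, 2 = '(', 3 = ')'
def pvTokKind (t : String) : Nat :=
  if t == "AND" || t == "OR" then 1 else if t == "(" then 2 else if t == ")" then 3 else 0

-- which token kinds may be adjacent in a well-formed infix expression
def pvAdjOK (a b : String) : Bool :=
  ((pvTokKind a == 0 || pvTokKind a == 3) && (pvTokKind b == 1 || pvTokKind b == 3)) ||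
  ((pvTokKind a == 1 || pvTokKind a == 2) && (pvTokKind b == 0 || pvTokKind b == 2))

def pvHeadOK : List String → Bool
  | [] => true
  | t :: _ => pvTokKind t == 0 || pvTokKind t == 2

def pvLastOK : List String → Bool
  | [] => true
  | [t] => pvTokKind t == 0 || pvTokKind t == 3
  | _ :: t :: ts => pvLastOK (t :: ts)

def pvDelta (t : String) : Int := if t == "(" then 1 else if t == ")" then -1 else 0

-- paren depth after the whole list / prefix depths all nonnegative
def pvDAfter (d : Int) : List String → Int
  | [] => d
  | t :: ts => pvDAfter (d + pvDelta t) ts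

def pvNonneg (d : Int) : List String → Bool
  | [] => true
  | t :: ts => decide (0 ≤ d + pvDelta t) && pvNonneg (d + pvDelta t) ts

-- Pre_ = well-formed infix expressions (nonempty, balanced parentheses, and the standard
-- local adjacency rules of an infix grammar). It excludes inputs on which A's unvalidated
-- shunting-yard still returns a value by accident — postfix/prefix-style operator placement
-- such as ['x','y','AND'] or ['AND','x','y'], and empty '()' groups as in
-- ['x','AND','(',')','y'] — because B's descent parser naturally raises ValueError there.
def Pre_parse_and_normalize (tokens : List String) : Prop :=
  tokens ≠ [] ∧ pvHeadOK tokens = true ∧ pvLastOK tokens = true ∧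
  pvNonneg 0 tokens = true ∧ pvDAfter 0 tokens = 0 ∧
  List.IsChain (fun a b => pvAdjOK a b = true) tokens

instance (tokens : List String) : Decidable (Pre_parse_and_normalize tokens) := by
  unfold Pre_parse_and_normalize; infer_instance

def pvWitness_parse_and_normalize : List String :=
  ["CS101", "AND", "(", "MATH76", "OR", "PHYS42", ")"]

def Spec_parse_and_normalize (tokens : List String) (out : List (List String)) : Prop :=
  out = parse_and_normalize_alt tokens
instance (tokens : List String) (out : List (List String)) : Decidable (Spec_parse_and_normalize tokens out) := by
  unfold Spec_parse_and_normalize; infer_instance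

-- ===== CLAIM (what is proved, stated in full; the proofs are below) =====
def Claim_equal_parse_and_normalize : Prop :=
  ∀ (tokens : List String), Dom_parse_and_normalize tokens →
    Pre_parse_and_normalize tokens →
    Spec_parse_and_normalize tokens (parse_and_normalize tokens)

-- ===== LEMMAS AND PROOFS =====

-- OR-combination of two CNFs (what both Pythons compute for an OR node)
def orComb (a b : List (List String)) : List (List String) :=
  a.flatMap (fun ca => b.map (fun cb => pvMergeOr ca cb))

-- derivations of the infix grammar, carrying the intended CNF; level 0 = atom,
-- 1 = AND-chain, 2 = OR-chain; chains are left-nested like the Python loops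
inductive PD : Nat → List String → List (List String) → Prop
  | name (t : String) : pvTokKind t = 0 → PD 0 [t] [[t]]
  | paren {ts c} : PD 2 ts c → PD 0 ("(" :: ts ++ [")"]) c
  | atom {ts c} : PD 0 ts c → PD 1 ts c
  | acons {ts1 c1 ts2 c2} : PD 1 ts1 c1 → PD 0 ts2 c2 → PD 1 (ts1 ++ "AND" :: ts2) (c1 ++ c2)
  | andE {ts c} : PD 1 ts c → PD 2 ts c
  | ocons {ts1 c1 ts2 c2} : PD 2 ts1 c1 → PD 1 ts2 c2 → PD 2 (ts1 ++ "OR" :: ts2) (orComb c1 c2)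

theorem kind1_cases {t : String} (h : pvTokKind t = 1) : t = "AND" ∨ t = "OR" := by
  unfold pvTokKind at h; split_ifs at h with h1 h2 h3
  · rcases Bool.or_eq_true_iff.mp h1 with h | h
    · exact Or.inl (by simpa using h)
    · exact Or.inr (by simpa using h)
  all_goals omega

theorem kind2_eq {t : String} (h : pvTokKind t = 2) : t = "(" := by
  unfold pvTokKind at h; split_ifs at h with h1 h2 h3 <;> first | simpa using h2 | omega

theorem kind3_eq {t : String} (h : pvTokKind t = 3) : t = ")" := by
  unfold pvTokKind at h; split_ifs at h with h1 h2 h3 <;> first | simpa using h3 | omega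

theorem kind0_facts {t : String} (h : pvTokKind t = 0) :
    t ≠ "AND" ∧ t ≠ "OR" ∧ t ≠ "(" ∧ t ≠ ")" := by
  refine ⟨?_, ?_, ?_, ?_⟩ <;> intro he <;> subst he <;> simp [pvTokKind] at h

-- ------- A-side machinery -------

-- eval steps without the final length-1 check
def pvSteps : List String → List (List (List String)) → Option (List (List (List String)))
  | [], stack => some stack
  | t :: ts, stack =>
    if t == "AND" || t == "OR" then
      match stack with
      | b :: a :: rest =>
        if t == "AND" then pvSteps ts ((a ++ b) :: rest)
        else
          pvSteps ts
            ((a.foldl (fun res ca => b.foldl (fun r2 cb => r2 ++ [pvMergeOr ca cb]) res) []) :: rest)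
      | _ => none
    else pvSteps ts ([[t]] :: stack)

theorem evalPostfix_eq_steps (ts : List String) (σ : List (List (List String))) :
    pvEvalPostfix ts σ =
      (pvSteps ts σ).bind (fun s => match s with | [x] => some x | _ => none) := by
  induction ts generalizing σ with
  | nil => rfl
  | cons t ts ih =>
    rcases σ with _ | ⟨b, _ | ⟨a, rest⟩⟩ <;>
      by_cases h : (t == "AND" || t == "OR") = true <;>
      by_cases h2 : (t == "AND") = true <;>
      by_cases h3 : t = "OR" <;>
      simp_all [pvEvalPostfix, pvSteps]

theorem steps_append (u v : List String) (σ : List (List (List String))) :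
    pvSteps (u ++ v) σ = (pvSteps u σ).bind (pvSteps v) := by
  induction u generalizing σ with
  | nil => rfl
  | cons t u ih =>
    rcases σ with _ | ⟨b, _ | ⟨a, rest⟩⟩ <;>
      by_cases h : (t == "AND" || t == "OR") = true <;>
      by_cases h2 : (t == "AND") = true <;>
      by_cases h3 : t = "OR" <;>
      simp_all [pvSteps]

theorem foldl_inner (b : List (List String)) (f : List String → List String) (res : List (List String)) :
    b.foldl (fun r2 cb => r2 ++ [f cb]) res = res ++ b.map f := by
  induction b generalizing res with
  | nil => simp
  | cons x b ih => simp [ih]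

theorem foldl_outer (b : List (List String)) (a : List (List String)) (acc : List (List String)) :
    a.foldl (fun res ca => res ++ b.map (pvMergeOr ca)) acc = acc ++ orComb a b := by
  induction a generalizing acc with
  | nil => simp [orComb]
  | cons ca a ih => simp [ih, orComb, List.flatMap_cons]

theorem foldl_orComb (a b : List (List String)) :
    a.foldl (fun res ca => b.foldl (fun r2 cb => r2 ++ [pvMergeOr ca cb]) res) [] = orComb a b := by
  simp only [foldl_inner]
  simpa using foldl_outer b a []

-- pending-operator accounting for the shunting yard
def AndCtx : List String → Prop
  | [] => True
  | o :: _ => o = "(" ∨ o = "OR"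

def OrCtx : List String → Prop
  | [] => True
  | o :: _ => o = "("

def SemN (P : List String) (c : List (List String)) : Prop :=
  ∀ σ, pvSteps P.reverse σ = some (c :: σ)

def AndPend (pnd P : List String) (c : List (List String)) : Prop :=
  (pnd = [] ∧ SemN P c) ∨
  (pnd = ["AND"] ∧ ∃ x y, c = x ++ y ∧ ∀ σ, pvSteps P.reverse σ = some (y :: x :: σ))

def OrPend (pnd P : List String) (c : List (List String)) : Prop :=
  AndPend pnd P c ∨
  (pnd = ["OR"] ∧ ∃ x y, c = orComb x y ∧ ∀ σ, pvSteps P.reverse σ = some (y :: x :: σ)) ∨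
  (pnd = ["AND", "OR"] ∧ ∃ x y z, c = orComb x (y ++ z) ∧
    ∀ σ, pvSteps P.reverse σ = some (z :: y :: x :: σ))

def AMot : Nat → List String → List (List String) → Prop
  | 0, ts, c => ∀ rest out ops, ∃ P,
      pvToPostfix (ts ++ rest) out ops = pvToPostfix rest (P ++ out) ops ∧ SemN P c
  | 1, ts, c => ∀ rest out ops, AndCtx ops → ∃ P pnd,
      pvToPostfix (ts ++ rest) out ops = pvToPostfix rest (P ++ out) (pnd ++ ops) ∧ AndPend pnd P c
  | 2, ts, c => ∀ rest out ops, OrCtx ops → ∃ P pnd,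
      pvToPostfix (ts ++ rest) out ops = pvToPostfix rest (P ++ out) (pnd ++ ops) ∧ OrPend pnd P c
  | _ + 3, _, _ => True

theorem toPostfix_op (t : String) (ht : (t == "AND" || t == "OR") = true) (ts out ops : List String) :
    pvToPostfix (t :: ts) out ops
      = pvToPostfix ts (pvPopGE t out ops).1 (t :: (pvPopGE t out ops).2) := by
  simp only [pvToPostfix, if_pos ht]

theorem toPostfix_lpar (ts out ops : List String) :
    pvToPostfix ("(" :: ts) out ops = pvToPostfix ts out ("(" :: ops) := by
  simp [pvToPostfix]

theorem toPostfix_rpar (ts out ops : List String) :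
    pvToPostfix (")" :: ts) out ops
      = match pvPopParen out ops with
        | none => none
        | some p => pvToPostfix ts p.1 p.2 := by
  simp [pvToPostfix]

theorem toPostfix_name (t : String) (hk : pvTokKind t = 0) (ts out ops : List String) :
    pvToPostfix (t :: ts) out ops = pvToPostfix ts (t :: out) ops := by
  obtain ⟨hA, hO, hL, hR⟩ := kind0_facts hk
  simp [pvToPostfix, hA, hO, hL, hR]

theorem popGE_orctx (t : String) (out ops : List String) (h : OrCtx ops) :
    pvPopGE t out ops = (out, ops) := by
  match ops with
  | [] => rfl
  | o :: r => simp only [OrCtx] at h; subst h; simp [pvPopGE]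

theorem popGE_and_andctx (out ops : List String) (h : AndCtx ops) :
    pvPopGE "AND" out ops = (out, ops) := by
  match ops with
  | [] => rfl
  | o :: r =>
    simp only [AndCtx] at h
    rcases h with h | h <;> subst h <;> simp [pvPopGE, pvPrec]

theorem steps_and (x y : List (List String)) (σ : List (List (List String))) :
    pvSteps ["AND"] (y :: x :: σ) = some ((x ++ y) :: σ) := rfl

theorem steps_or (x y : List (List String)) (σ : List (List (List String))) :
    pvSteps ["OR"] (y :: x :: σ) = some (orComb x y :: σ) := by
  rw [show pvSteps ["OR"] (y :: x :: σ)
      = some ((x.foldl (fun res ca => y.foldl (fun r2 cb => r2 ++ [pvMergeOr ca cb]) res) []) :: σ)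
    from rfl, foldl_orComb]

theorem orpend_flush {pnd P : List String} {c : List (List String)} (h : OrPend pnd P c) :
    ∀ σ, pvSteps (P.reverse ++ pnd) σ = some (c :: σ) := by
  intro σ
  rw [steps_append]
  rcases h with (⟨hpnd, hsem⟩ | ⟨hpnd, x, y, hc, hsem⟩) | ⟨hpnd, x, y, hc, hsem⟩ |
    ⟨hpnd, x, y, z, hc, hsem⟩ <;> subst hpnd <;> rw [hsem] <;> try subst hc
  · rfl
  · rw [Option.bind_some, steps_and]
  · rw [Option.bind_some, steps_or]
  · rw [Option.bind_some, show (["AND", "OR"] : List String) = ["AND"] ++ ["OR"] from rfl,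
      steps_append, steps_and, Option.bind_some, steps_or]

theorem a_sim {lv ts c} (h : PD lv ts c) : AMot lv ts c := by
  induction h with
  | name t hk =>
    intro rest out ops
    refine ⟨[t], ?_, ?_⟩
    · rw [List.cons_append, toPostfix_name t hk]; rfl
    · intro σ
      obtain ⟨hA, hO, hL, hR⟩ := kind0_facts hk
      simp [pvSteps, hA, hO]
  | @paren u cc hu ih =>
    intro rest out ops
    obtain ⟨P, pnd, heq, hp⟩ := ih (")" :: rest) out ("(" :: ops) (by trivial)
    refine ⟨pnd.reverse ++ P, ?_, ?_⟩
    · rw [show ("(" :: u ++ [")"]) ++ rest = "(" :: (u ++ (")" :: rest)) by simp,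
        toPostfix_lpar, heq, toPostfix_rpar]
      have hpp : pvPopParen (P ++ out) (pnd ++ "(" :: ops) = some (pnd.reverse ++ P ++ out, ops) := by
        rcases hp with (⟨hpnd, _⟩ | ⟨hpnd, _⟩) | ⟨hpnd, _⟩ | ⟨hpnd, _⟩ <;> subst hpnd <;>
          simp [pvPopParen]
      rw [hpp]
    · intro σ
      rw [show (pnd.reverse ++ P).reverse = P.reverse ++ pnd by simp]
      exact orpend_flush hp σ
  | @atom ts0 c0 h0 ih =>
    intro rest out ops _
    obtain ⟨P, heq, hsem⟩ := ih rest out ops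
    exact ⟨P, [], by simpa using heq, Or.inl ⟨rfl, hsem⟩⟩
  | @acons ts1 c1 ts2 c2 h1 h0 ih1 ih0 =>
    intro rest out ops hctx
    obtain ⟨P1, pnd1, heq1, hp1⟩ := ih1 ("AND" :: (ts2 ++ rest)) out ops hctx
    obtain ⟨P2, heq2, hsem2⟩ := ih0 rest (pnd1.reverse ++ P1 ++ out) ("AND" :: ops)
    refine ⟨P2 ++ pnd1.reverse ++ P1, ["AND"], ?_, ?_⟩
    · rw [show (ts1 ++ "AND" :: ts2) ++ rest = ts1 ++ ("AND" :: (ts2 ++ rest)) by simp,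
        heq1, toPostfix_op "AND" (by simp)]
      have hpop : pvPopGE "AND" (P1 ++ out) (pnd1 ++ ops) = (pnd1.reverse ++ P1 ++ out, ops) := by
        rcases hp1 with ⟨hpnd, _⟩ | ⟨hpnd, _⟩ <;> subst hpnd
        · simpa using popGE_and_andctx (P1 ++ out) ops hctx
        · simp only [List.cons_append, List.nil_append, pvPopGE, pvPrec]
          rw [if_pos (by simp)]
          simpa using popGE_and_andctx ("AND" :: (P1 ++ out)) ops hctx
      rw [hpop]
      simpa [List.append_assoc] using heq2
    · refine Or.inr ⟨rfl, c1, c2, rfl, ?_⟩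
      intro σ
      rw [show (P2 ++ pnd1.reverse ++ P1).reverse = (P1.reverse ++ pnd1) ++ P2.reverse by simp,
        steps_append, orpend_flush (Or.inl hp1) σ]
      exact hsem2 (c1 :: σ)
  | @andE ts0 c0 h1 ih =>
    intro rest out ops hctx
    have hctx' : AndCtx ops := by
      match ops with
      | [] => trivial
      | o :: r => simp only [OrCtx] at hctx; simp [AndCtx, hctx]
    obtain ⟨P, pnd, heq, hp⟩ := ih rest out ops hctx'
    exact ⟨P, pnd, heq, Or.inl hp⟩
  | @ocons ts1 c1 ts2 c2 h2 h1 ih2 ih1 =>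
    intro rest out ops hctx
    obtain ⟨P1, pnd1, heq1, hp1⟩ := ih2 ("OR" :: (ts2 ++ rest)) out ops hctx
    obtain ⟨P2, pnd2, heq2, hp2⟩ := ih1 rest (pnd1.reverse ++ P1 ++ out) ("OR" :: ops) (by simp [AndCtx])
    refine ⟨P2 ++ pnd1.reverse ++ P1, pnd2 ++ ["OR"], ?_, ?_⟩
    · rw [show (ts1 ++ "OR" :: ts2) ++ rest = ts1 ++ ("OR" :: (ts2 ++ rest)) by simp,
        heq1, toPostfix_op "OR" (by simp)]
      have hpop : pvPopGE "OR" (P1 ++ out) (pnd1 ++ ops) = (pnd1.reverse ++ P1 ++ out, ops) := by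
        rcases hp1 with (⟨hpnd, _⟩ | ⟨hpnd, _⟩) | ⟨hpnd, _⟩ | ⟨hpnd, _⟩ <;> subst hpnd <;>
          simp [pvPopGE, pvPrec, popGE_orctx _ _ _ hctx]
      rw [hpop]
      simpa [List.append_assoc] using heq2
    · have hflush : ∀ σ, pvSteps ((P2 ++ pnd1.reverse ++ P1).reverse) σ = pvSteps P2.reverse (c1 :: σ) := by
        intro σ
        rw [show (P2 ++ pnd1.reverse ++ P1).reverse = (P1.reverse ++ pnd1) ++ P2.reverse by simp,
          steps_append, orpend_flush hp1 σ]
        rfl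
      rcases hp2 with ⟨hpnd, hsem⟩ | ⟨hpnd, x, y, hc, hsem⟩ <;> subst hpnd
      · refine Or.inr (Or.inl ⟨rfl, c1, c2, rfl, ?_⟩)
        intro σ
        rw [hflush σ]
        exact hsem (c1 :: σ)
      · subst hc
        refine Or.inr (Or.inr ⟨rfl, c1, x, y, rfl, ?_⟩)
        intro σ
        rw [hflush σ]
        exact hsem (c1 :: σ)

theorem t3 {ts c} (h : PD 2 ts c) : parse_and_normalize ts = c := by
  have := a_sim h (lv := 2)
  simp only [AMot] at this
  obtain ⟨P, pnd, heq, hp⟩ := this [] [] [] (by trivial)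
  simp only [List.append_nil] at heq
  have hdrain : pvDrain P pnd = some (pnd.reverse ++ P) := by
    rcases hp with (⟨hpnd, _⟩ | ⟨hpnd, _⟩) | ⟨hpnd, _⟩ | ⟨hpnd, _⟩ <;> subst hpnd <;>
      simp [pvDrain]
  unfold parse_and_normalize
  rw [heq]
  simp only [pvToPostfix]
  rw [hdrain]
  show (match pvEvalPostfix (pnd.reverse ++ P).reverse [] with | none => [] | some r => r) = c
  rw [show (pnd.reverse ++ P).reverse = P.reverse ++ pnd by simp,
    evalPostfix_eq_steps, orpend_flush hp []]
  rfl

-- ------- B-side machinery -------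

def AtomR (ts : List String) (c : List (List String)) (r : List String) : Prop :=
  ∃ f, f ≤ 3 * ts.length + 1 ∧ pvParseAtom f ts = some (c, r)
def AndR (ts : List String) (c : List (List String)) (r : List String) : Prop :=
  ∃ f, f ≤ 3 * ts.length + 2 ∧ pvParseAnd f ts = some (c, r)
def AndLoopR (acc : List (List String)) (ts : List String) (c : List (List String)) (r : List String) : Prop :=
  ∃ f, f ≤ 3 * ts.length + 1 ∧ pvParseAndLoop f acc ts = some (c, r)
def OrR (ts : List String) (c : List (List String)) (r : List String) : Prop :=
  ∃ f, f ≤ 3 * ts.length + 3 ∧ pvParseOr f ts = some (c, r)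
def OrLoopR (acc : List (List String)) (ts : List String) (c : List (List String)) (r : List String) : Prop :=
  ∃ f, f ≤ 3 * ts.length + 2 ∧ pvParseOrLoop f acc ts = some (c, r)

theorem pvParseAndLoop_ne (f : Nat) (acc : List (List String)) (t : String) (rest : List String)
    (h : ¬ t = "AND") : pvParseAndLoop (f + 1) acc (t :: rest) = some (acc, t :: rest) := by
  rw [pvParseAndLoop.eq_def]
  split
  · omega
  · rename_i heq hne
    simp only [List.cons.injEq] at hne
    exact absurd hne.1 h
  · rfl

theorem pvParseOrLoop_ne (f : Nat) (acc : List (List String)) (t : String) (rest : List String)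
    (h : ¬ t = "OR") : pvParseOrLoop (f + 1) acc (t :: rest) = some (acc, t :: rest) := by
  rw [pvParseOrLoop.eq_def]
  split
  · omega
  · rename_i heq hne
    simp only [List.cons.injEq] at hne
    exact absurd hne.1 h
  · rfl

theorem parse_mono (f : Nat) :
    (∀ ts x, pvParseAtom f ts = some x → pvParseAtom (f + 1) ts = some x) ∧
    (∀ ts x, pvParseAnd f ts = some x → pvParseAnd (f + 1) ts = some x) ∧
    (∀ acc ts x, pvParseAndLoop f acc ts = some x → pvParseAndLoop (f + 1) acc ts = some x) ∧
    (∀ ts x, pvParseOr f ts = some x → pvParseOr (f + 1) ts = some x) ∧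
    (∀ acc ts x, pvParseOrLoop f acc ts = some x → pvParseOrLoop (f + 1) acc ts = some x) := by
  induction f with
  | zero =>
    refine ⟨?_, ?_, ?_, ?_, ?_⟩ <;> intros <;> simp_all [pvParseAtom, pvParseAnd, pvParseAndLoop, pvParseOr, pvParseOrLoop]
  | succ f ih =>
    obtain ⟨ia, in_, il, io, iol⟩ := ih
    refine ⟨?_, ?_, ?_, ?_, ?_⟩
    · intro ts x h
      match ts with
      | [] => simpa [pvParseAtom] using h
      | t :: rest =>
        simp only [pvParseAtom] at h ⊢
        by_cases h1 : (t == "(") = true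
        · rw [if_pos h1] at h ⊢
          rcases ho : pvParseOr f rest with _ | ⟨c, r⟩
          · rw [ho] at h; exact absurd h (by simp)
          · rw [ho] at h; rw [io _ _ ho]
            exact h
        · rw [if_neg h1] at h ⊢; exact h
    · intro ts x h
      simp only [pvParseAnd] at h ⊢
      rcases ho : pvParseAtom f ts with _ | ⟨c, r⟩
      · rw [ho] at h; exact absurd h (by simp)
      · rw [ho] at h; rw [ia _ _ ho]; exact il _ _ _ h
    · intro acc ts x h
      match ts with
      | [] => simpa [pvParseAndLoop] using h
      | t :: rest =>
        by_cases h1 : t = "AND"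
        · subst h1
          simp only [pvParseAndLoop] at h ⊢
          rcases ho : pvParseAtom f rest with _ | ⟨c, r⟩
          · rw [ho] at h; exact absurd h (by simp)
          · rw [ho] at h; rw [ia _ _ ho]; exact il _ _ _ h
        · rw [pvParseAndLoop_ne f acc t rest h1] at h
          rw [pvParseAndLoop_ne (f+1) acc t rest h1]
          exact h
    · intro ts x h
      simp only [pvParseOr] at h ⊢
      rcases ho : pvParseAnd f ts with _ | ⟨c, r⟩
      · rw [ho] at h; exact absurd h (by simp)
      · rw [ho] at h; rw [in_ _ _ ho]; exact iol _ _ _ h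
    · intro acc ts x h
      match ts with
      | [] => simpa [pvParseOrLoop] using h
      | t :: rest =>
        by_cases h1 : t = "OR"
        · subst h1
          simp only [pvParseOrLoop] at h ⊢
          rcases ho : pvParseAnd f rest with _ | ⟨c, r⟩
          · rw [ho] at h; exact absurd h (by simp)
          · rw [ho] at h; rw [in_ _ _ ho]; exact iol _ _ _ h
        · rw [pvParseOrLoop_ne f acc t rest h1] at h
          rw [pvParseOrLoop_ne (f+1) acc t rest h1]
          exact h

theorem parse_mono_le {f g : Nat} (h : f ≤ g) :
    (∀ ts x, pvParseAtom f ts = some x → pvParseAtom g ts = some x) ∧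
    (∀ ts x, pvParseAnd f ts = some x → pvParseAnd g ts = some x) ∧
    (∀ acc ts x, pvParseAndLoop f acc ts = some x → pvParseAndLoop g acc ts = some x) ∧
    (∀ ts x, pvParseOr f ts = some x → pvParseOr g ts = some x) ∧
    (∀ acc ts x, pvParseOrLoop f acc ts = some x → pvParseOrLoop g acc ts = some x) := by
  induction h with
  | refl => exact ⟨fun _ _ => id, fun _ _ => id, fun _ _ _ => id, fun _ _ => id, fun _ _ _ => id⟩
  | @step m h2 ih =>
    obtain ⟨ia, in_, il, io, iol⟩ := ih
    obtain ⟨ja, jn, jl, jo, jol⟩ := parse_mono m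
    exact ⟨fun ts x hx => ja _ _ (ia _ _ hx), fun ts x hx => jn _ _ (in_ _ _ hx),
      fun a ts x hx => jl _ _ _ (il _ _ _ hx), fun ts x hx => jo _ _ (io _ _ hx),
      fun a ts x hx => jol _ _ _ (iol _ _ _ hx)⟩

def BMot : Nat → List String → List (List String) → Prop
  | 0, ts, c => ∀ rest, AtomR (ts ++ rest) c rest
  | 1, ts, c => ∀ rest c' r', AndLoopR c rest c' r' → AndR (ts ++ rest) c' r'
  | 2, ts, c => ∀ rest c' r', rest.head? ≠ some "AND" → OrLoopR c rest c' r' → OrR (ts ++ rest) c' r'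
  | _ + 3, _, _ => True

theorem andLoop_stop (acc : List (List String)) (r : List String) (h : r.head? ≠ some "AND") :
    pvParseAndLoop 1 acc r = some (acc, r) := by
  match r with
  | [] => rfl
  | t :: rest => exact pvParseAndLoop_ne 0 acc t rest (by simpa using h)

theorem orLoop_stop (acc : List (List String)) (r : List String) (h : r.head? ≠ some "OR") :
    pvParseOrLoop 1 acc r = some (acc, r) := by
  match r with
  | [] => rfl
  | t :: rest => exact pvParseOrLoop_ne 0 acc t rest (by simpa using h)

theorem b_sim {lv ts c} (h : PD lv ts c) : BMot lv ts c := by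
  induction h with
  | name t hk =>
    intro rest
    obtain ⟨hA, hO, hL, hR⟩ := kind0_facts hk
    refine ⟨1, by simp only [List.length_append, List.length_cons]; omega, ?_⟩
    simp only [List.cons_append, List.nil_append, pvParseAtom]
    rw [if_neg (by simpa using hL), if_neg (by simp [hA, hO, hR])]
  | @paren u cc hu ih =>
    intro rest
    have hstop : OrLoopR cc (")" :: rest) cc (")" :: rest) :=
      ⟨1, by simp only [List.length_cons]; omega, orLoop_stop _ _ (by simp)⟩
    obtain ⟨fo, hfo, ho⟩ := ih (")" :: rest) cc (")" :: rest) (by simp) hstop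
    refine ⟨fo + 1, ?_, ?_⟩
    · simp only [List.length_append, List.length_cons] at hfo ⊢; omega
    · rw [show ("(" :: u ++ [")"]) ++ rest = "(" :: (u ++ (")" :: rest)) by simp]
      simp only [pvParseAtom]
      rw [if_pos (by simp), ho]
      rfl
  | @atom ts0 c0 h0 ih =>
    intro rest c' r' hl
    obtain ⟨fa, hfa, ha⟩ := ih rest
    obtain ⟨fl, hfl, hlp⟩ := hl
    refine ⟨max fa fl + 1, by simp only [List.length_append] at hfa hfl ⊢; omega, ?_⟩
    simp only [pvParseAnd]
    rw [(parse_mono_le (le_max_left fa fl)).1 _ _ ha]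
    exact (parse_mono_le (le_max_right fa fl)).2.2.1 _ _ _ hlp
  | @acons ts1 c1 ts2 c2 h1 h0 ih1 ih0 =>
    intro rest c' r' hl
    obtain ⟨fa, hfa, ha⟩ := ih0 rest
    obtain ⟨fl, hfl, hlp⟩ := hl
    have hloop : AndLoopR c1 ("AND" :: (ts2 ++ rest)) c' r' := by
      refine ⟨max fa fl + 1, by simp only [List.length_append, List.length_cons] at hfa hfl ⊢; omega, ?_⟩
      simp only [pvParseAndLoop]
      rw [(parse_mono_le (le_max_left fa fl)).1 _ _ ha]
      exact (parse_mono_le (le_max_right fa fl)).2.2.1 _ _ _ hlp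
    rw [show (ts1 ++ "AND" :: ts2) ++ rest = ts1 ++ ("AND" :: (ts2 ++ rest)) by simp]
    exact ih1 _ c' r' hloop
  | @andE ts0 c0 h1 ih =>
    intro rest c' r' hne hl
    have hstop : AndLoopR c0 rest c0 rest := ⟨1, by omega, andLoop_stop _ _ hne⟩
    obtain ⟨fn, hfn, hn⟩ := ih rest c0 rest hstop
    obtain ⟨fl, hfl, hlp⟩ := hl
    refine ⟨max fn fl + 1, by simp only [List.length_append] at hfn hfl ⊢; omega, ?_⟩
    simp only [pvParseOr]
    rw [(parse_mono_le (le_max_left fn fl)).2.1 _ _ hn]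
    exact (parse_mono_le (le_max_right fn fl)).2.2.2.2 _ _ _ hlp
  | @ocons ts1 c1 ts2 c2 h2 h1 ih2 ih1 =>
    intro rest c' r' hne hl
    have hstop : AndLoopR c2 rest c2 rest := ⟨1, by omega, andLoop_stop _ _ hne⟩
    obtain ⟨fn, hfn, hn⟩ := ih1 rest c2 rest hstop
    obtain ⟨fl, hfl, hlp⟩ := hl
    have hloop : OrLoopR c1 ("OR" :: (ts2 ++ rest)) c' r' := by
      refine ⟨max fn fl + 1, by simp only [List.length_append, List.length_cons] at hfn hfl ⊢; omega, ?_⟩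
      simp only [pvParseOrLoop]
      rw [(parse_mono_le (le_max_left fn fl)).2.1 _ _ hn]
      exact (parse_mono_le (le_max_right fn fl)).2.2.2.2 _ _ _ hlp
    rw [show (ts1 ++ "OR" :: ts2) ++ rest = ts1 ++ ("OR" :: (ts2 ++ rest)) by simp]
    exact ih2 _ c' r' (by simp) hloop

theorem t2 {ts c} (h : PD 2 ts c) : parse_and_normalize_alt ts = c := by
  have hstop : OrLoopR c [] c [] := ⟨1, by omega, rfl⟩
  have := b_sim h (lv := 2)
  simp only [BMot] at this
  obtain ⟨f, hf, ho⟩ := this [] c [] (by simp) hstop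
  rw [List.append_nil] at ho
  rw [List.append_nil] at hf
  unfold parse_and_normalize_alt
  rw [(parse_mono_le (by omega : f ≤ 3 * ts.length + 3)).2.2.2.1 _ _ ho]

-- ------- derivation existence from Pre_ -------

-- find the LAST operator occurrence at paren depth 0 (relative to start depth d)
def pvSfind (op : String) : List String → Int → Option (List String × List String)
  | [], _ => none
  | t :: ts, d =>
    match pvSfind op ts (d + pvDelta t) with
    | some (l, r) => some (t :: l, r)
    | none => if t == op && d == 0 then some ([], ts) else none

theorem delta_of_kind0 {t : String} (h : pvTokKind t = 0) : pvDelta t = 0 := by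
  obtain ⟨_, _, hL, hR⟩ := kind0_facts h
  simp [pvDelta, hL, hR]

theorem delta_of_kind1 {t : String} (h : pvTokKind t = 1) : pvDelta t = 0 := by
  rcases kind1_cases h with h | h <;> subst h <;> rfl

theorem dAfter_append (d : Int) (l r : List String) :
    pvDAfter d (l ++ r) = pvDAfter (pvDAfter d l) r := by
  induction l generalizing d with
  | nil => rfl
  | cons t l ih => simp only [List.cons_append, pvDAfter, ih]

theorem nonneg_append (d : Int) (l r : List String) :
    pvNonneg d (l ++ r) = (pvNonneg d l && pvNonneg (pvDAfter d l) r) := by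
  induction l generalizing d with
  | nil => simp [pvNonneg, pvDAfter]
  | cons t l ih =>
    simp only [List.cons_append, pvNonneg, pvDAfter, ih, Bool.and_assoc]

theorem sfind_cons_none {op t : String} {u : List String} {d : Int}
    (h : pvSfind op (t :: u) d = none) : pvSfind op u (d + pvDelta t) = none := by
  cases hs : pvSfind op u (d + pvDelta t) with
  | none => rfl
  | some p => simp [pvSfind, hs] at h

theorem sfind_cons_cond {op t : String} {u : List String} {d : Int}
    (h : pvSfind op (t :: u) d = none) : ¬(t = op ∧ d = 0) := by
  intro ⟨h1, h2⟩
  subst h1; subst h2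
  have hin := sfind_cons_none h
  rw [Int.zero_add] at hin
  simp [pvSfind, hin] at h

theorem sfind_self (op : String) (rest : List String) : pvSfind op (op :: rest) 0 ≠ none := by
  cases h : pvSfind op rest (pvDelta op) with
  | none => simp [pvSfind, h]
  | some p => simp [pvSfind, h]

theorem sfind_none_split {op : String} {l r : List String} {d : Int}
    (h : pvSfind op (l ++ r) d = none) :
    pvSfind op l d = none ∧ pvSfind op r (pvDAfter d l) = none := by
  induction l generalizing d with
  | nil => exact ⟨rfl, h⟩
  | cons t l ih =>
    rw [List.cons_append] at h
    have hin := sfind_cons_none h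
    have hcond := sfind_cons_cond h
    obtain ⟨h1, h2⟩ := ih hin
    refine ⟨?_, h2⟩
    simp only [pvSfind, h1]
    simp only [Bool.and_eq_true, beq_iff_eq]
    rw [if_neg (by simpa using hcond)]

theorem sfind_some_split {op : String} (hop : pvDelta op = 0) :
    ∀ {ts : List String} {d : Int} {l r : List String},
    pvSfind op ts d = some (l, r) →
    ts = l ++ op :: r ∧ pvDAfter d l = 0 ∧ pvSfind op r 0 = none := by
  intro ts
  induction ts with
  | nil => intro d l r h; simp [pvSfind] at h
  | cons t u ih =>
    intro d l r h
    cases hin : pvSfind op u (d + pvDelta t) with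
    | some p =>
      obtain ⟨l', r'⟩ := p
      simp only [pvSfind, hin] at h
      obtain ⟨hl, hr⟩ := Prod.mk.injEq .. ▸ Option.some.injEq .. ▸ h
      obtain ⟨hu, hd, hn⟩ := ih hin
      subst hl; subst hr
      refine ⟨by rw [hu]; rfl, ?_, hn⟩
      simpa [pvDAfter] using hd
    | none =>
      simp only [pvSfind, hin] at h
      by_cases hc : (t == op && d == 0) = true
      · rw [if_pos hc] at h
        simp only [Bool.and_eq_true, beq_iff_eq] at hc
        obtain ⟨hl, hr⟩ := Prod.mk.injEq .. ▸ Option.some.injEq .. ▸ h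
        subst hl; subst hr
        obtain ⟨ht, hd⟩ := hc
        subst ht; subst hd
        refine ⟨rfl, rfl, ?_⟩
        rw [hop] at hin
        simpa using hin
      · rw [if_neg hc] at h
        exact absurd h (by simp)

theorem headOK_append {l : List String} (r : List String) (h : l ≠ []) :
    pvHeadOK (l ++ r) = pvHeadOK l := by
  cases l with
  | nil => exact absurd rfl h
  | cons t l => rfl

theorem lastOK_append {l : List String} (r : List String) (h : r ≠ []) :
    pvLastOK (l ++ r) = pvLastOK r := by
  induction l with
  | nil => rfl
  | cons t l ih =>
    cases hl : l ++ r with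
    | nil => exact absurd (List.append_eq_nil_iff.mp hl).2 h
    | cons s w => rw [List.cons_append, hl, show pvLastOK (t :: s :: w) = pvLastOK (s :: w) from rfl, ← hl, ih]

theorem lastOK_concat (l : List String) (x : String) :
    pvLastOK (l ++ [x]) = (pvTokKind x == 0 || pvTokKind x == 3) := by
  rw [lastOK_append [x] (by simp)]; rfl

theorem adjOK_cases {a b : String} (h : pvAdjOK a b = true) :
    ((pvTokKind a = 0 ∨ pvTokKind a = 3) ∧ (pvTokKind b = 1 ∨ pvTokKind b = 3)) ∨
    ((pvTokKind a = 1 ∨ pvTokKind a = 2) ∧ (pvTokKind b = 0 ∨ pvTokKind b = 2)) := by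
  simp only [pvAdjOK, Bool.or_eq_true, Bool.and_eq_true, beq_iff_eq] at h
  tauto

theorem good_split {op : String} {ts l r : List String} (hop : pvTokKind op = 1)
    (hg : Pre_parse_and_normalize ts) (hs : pvSfind op ts 0 = some (l, r)) :
    ts = l ++ op :: r ∧ Pre_parse_and_normalize l ∧ Pre_parse_and_normalize r ∧
    pvDAfter 0 l = 0 ∧ pvSfind op r 0 = none ∧ l.length < ts.length ∧ r.length < ts.length := by
  obtain ⟨hne, hH, hL, hN, hD, hC⟩ := hg
  have hdop : pvDelta op = 0 := delta_of_kind1 hop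
  obtain ⟨hts, hdl, hrn⟩ := sfind_some_split hdop hs
  subst hts
  have hlne : l ≠ [] := by
    intro he; subst he
    simp only [List.nil_append, pvHeadOK, hop] at hH
    simp at hH
  have hrne : r ≠ [] := by
    intro he; subst he
    rw [show l ++ op :: ([] : List String) = l ++ [op] from rfl, lastOK_concat, hop] at hL
    simp at hL
  obtain ⟨hCl, hCor, hjun⟩ := List.isChain_append.mp hC
  obtain ⟨hjun2, hCr⟩ := List.isChain_cons.mp hCor
  obtain ⟨l0, x, hlx⟩ := l.eq_nil_or_concat.resolve_left hlne
  rw [List.concat_eq_append] at hlx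
  obtain ⟨y, r', hry⟩ : ∃ y r', r = y :: r' := by
    cases r with
    | nil => exact absurd rfl hrne
    | cons y r' => exact ⟨y, r', rfl⟩
  have hNl : pvNonneg 0 l = true := by
    rw [nonneg_append] at hN
    exact ((Bool.and_eq_true _ _).mp hN).1
  have hNr : pvNonneg 0 r = true := by
    rw [nonneg_append, hdl] at hN
    have := ((Bool.and_eq_true _ _).mp hN).2
    simp only [pvNonneg, hdop] at this
    simpa using ((Bool.and_eq_true _ _).mp this).2
  have hDr : pvDAfter 0 r = 0 := by
    rw [dAfter_append, hdl] at hD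
    simpa [pvDAfter, hdop] using hD
  have hLl : pvLastOK l = true := by
    subst hlx
    have hadj : pvAdjOK x op = true := by
      have := hjun x (by simp) op (by simp)
      exact this
    rcases adjOK_cases hadj with ⟨hx, _⟩ | ⟨_, hko⟩
    · rw [lastOK_concat]
      rcases hx with hx | hx <;> simp [hx]
    · omega
  have hHr : pvHeadOK r = true := by
    subst hry
    have hadj : pvAdjOK op y = true := hjun2 y rfl
    rcases adjOK_cases hadj with ⟨hko, _⟩ | ⟨_, hy⟩
    · omega
    · simp only [pvHeadOK]
      rcases hy with hy | hy <;> simp [hy]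
  refine ⟨rfl, ⟨hlne, ?_, hLl, hNl, hdl, hCl⟩, ⟨hrne, hHr, ?_, hNr, hDr, hCr⟩, hdl, hrn, ?_, ?_⟩
  · rw [headOK_append _ hlne] at hH; exact hH
  · rw [lastOK_append (op :: r) (by simp)] at hL
    rw [hry] at hL ⊢
    exact hL
  · simp only [List.length_append, List.length_cons]; omega
  · simp only [List.length_append, List.length_cons]; omega

theorem l_close : ∀ (u : List String) (d : Int), 1 ≤ d → pvNonneg d u = true → pvDAfter d u = 0 →
    List.IsChain (fun a b => pvAdjOK a b = true) u →
    pvSfind "AND" u d = none → pvSfind "OR" u d = none →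
    ∃ mid, u = mid ++ [")"] ∧ pvNonneg (d - 1) mid = true ∧ pvDAfter (d - 1) mid = 0 := by
  intro u
  induction u with
  | nil => intro d hd _ hD _ _ _; simp only [pvDAfter] at hD; omega
  | cons t u ih =>
    intro d hd hN hD hC hnA hnO
    have hsp : (0 : Int) ≤ d + pvDelta t ∧ pvNonneg (d + pvDelta t) u = true := by
      simpa [pvNonneg] using hN
    have hN' : pvNonneg (d + pvDelta t) u = true := hsp.2
    have hd0 : (0 : Int) ≤ d + pvDelta t := hsp.1
    by_cases hz : d + pvDelta t = 0
    · -- t closes the group: t = ")" and d = 1, u must be empty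
      have hdel : pvDelta t = -1 ∧ d = 1 := by
        have h3 : pvDelta t = 1 ∨ pvDelta t = 0 ∨ pvDelta t = -1 := by
          unfold pvDelta; split_ifs <;> simp
        rcases h3 with h3 | h3 | h3 <;> rw [h3] at hz <;> rw [h3] <;> omega
      have ht : t = ")" := by
        rcases hdel with ⟨hdel, _⟩
        unfold pvDelta at hdel
        split_ifs at hdel with h1 h2 <;> first | omega | simpa using h2
      subst ht
      cases u with
      | nil => exact ⟨[], rfl, rfl, by simp only [pvDAfter]; omega⟩
      | cons s w =>
        exfalso
        have hadj : pvAdjOK ")" s = true := (List.isChain_cons_cons.mp hC).1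
        rcases adjOK_cases hadj with ⟨_, hs1 | hs3⟩ | ⟨_, _⟩
        · -- s is an operator at depth 0: contradicts sfind = none
          rcases kind1_cases hs1 with hs | hs <;> subst hs
          · have := sfind_cons_none hnA
            rw [hz] at this
            exact sfind_self _ _ this
          · have := sfind_cons_none hnO
            rw [hz] at this
            exact sfind_self _ _ this
        · -- s = ")" would drive the depth negative
          have hs : s = ")" := kind3_eq hs3
          subst hs
          have hsp2 := hN'
          simp [pvNonneg, pvDelta] at hsp2
          have hz' : d = 1 := by rw [show pvDelta ")" = -1 from rfl] at hz; omega
          omega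
        · rename_i hk _
          simp [pvTokKind] at hk
    · have hd1 : 1 ≤ d + pvDelta t := by omega
      have hD' : pvDAfter (d + pvDelta t) u = 0 := hD
      obtain ⟨mid, hmid, hmn, hmd⟩ :=
        ih (d + pvDelta t) hd1 hN' hD' hC.tail (sfind_cons_none hnA) (sfind_cons_none hnO)
      refine ⟨t :: mid, by rw [hmid]; rfl, ?_, ?_⟩
      · simp only [pvNonneg]
        rw [show d - 1 + pvDelta t = d + pvDelta t - 1 by omega]
        rw [show pvNonneg (d + pvDelta t - 1) mid = true from hmn]
        simp only [Bool.and_true]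
        simpa using by omega
      · simp only [pvDAfter]
        rw [show d - 1 + pvDelta t = d + pvDelta t - 1 by omega]
        exact hmd

theorem good_paren {ts : List String} (hg : Pre_parse_and_normalize ts)
    (hnA : pvSfind "AND" ts 0 = none) (hnO : pvSfind "OR" ts 0 = none) (hlen : 2 ≤ ts.length) :
    ∃ mid, ts = "(" :: mid ++ [")"] ∧ Pre_parse_and_normalize mid ∧ mid.length < ts.length := by
  obtain ⟨hne, hH, hL, hN, hD, hC⟩ := hg
  obtain ⟨t, ts', rfl⟩ : ∃ t ts', ts = t :: ts' := by
    cases ts with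
    | nil => exact absurd rfl hne
    | cons t ts' => exact ⟨t, ts', rfl⟩
  have hkt : pvTokKind t = 0 ∨ pvTokKind t = 2 := by
    simpa [pvHeadOK] using hH
  obtain ⟨s, w, rfl⟩ : ∃ s w, ts' = s :: w := by
    cases ts' with
    | nil => simp at hlen
    | cons s w => exact ⟨s, w, rfl⟩
  have ht : t = "(" := by
    rcases hkt with hk0 | hk2
    · exfalso
      have hadj : pvAdjOK t s = true := (List.isChain_cons_cons.mp hC).1
      have hdt : pvDelta t = 0 := delta_of_kind0 hk0
      rcases adjOK_cases hadj with ⟨_, hs1 | hs3⟩ | ⟨hk, _⟩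
      · rcases kind1_cases hs1 with hs | hs <;> subst hs
        · have := sfind_cons_none hnA
          rw [hdt] at this
          simp only [add_zero] at this
          exact sfind_self _ _ this
        · have := sfind_cons_none hnO
          rw [hdt] at this
          simp only [add_zero] at this
          exact sfind_self _ _ this
      · have hs : s = ")" := kind3_eq hs3
        subst hs
        simp only [pvNonneg] at hN
        rw [hdt] at hN
        simp [pvDelta] at hN
      · omega
    · exact kind2_eq hk2
  subst ht
  have hN' : pvNonneg 1 (s :: w) = true := by
    simpa [pvNonneg, pvDelta] using hN
  have hD' : pvDAfter 1 (s :: w) = 0 := by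
    simpa [pvDAfter, pvDelta] using hD
  obtain ⟨mid, hmid, hmn, hmd⟩ := l_close (s :: w) 1 le_rfl hN' hD' hC.tail
    (by simpa [pvDelta] using sfind_cons_none hnA)
    (by simpa [pvDelta] using sfind_cons_none hnO)
  rw [hmid] at hC ⊢
  have hmne : mid ≠ [] := by
    intro he; subst he
    have hadj : pvAdjOK "(" ")" = true := (List.isChain_cons_cons.mp hC).1
    rcases adjOK_cases hadj with ⟨hk, _⟩ | ⟨_, hk⟩ <;> simp [pvTokKind] at hk
  obtain ⟨hCl, _, hjun⟩ := List.isChain_append.mp hC.tail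
  refine ⟨mid, rfl, ⟨hmne, ?_, ?_, by simpa using hmn, by simpa using hmd, hCl⟩, ?_⟩
  · obtain ⟨m0, mr, rfl⟩ : ∃ m0 mr, mid = m0 :: mr := by
      cases mid with
      | nil => exact absurd rfl hmne
      | cons m0 mr => exact ⟨m0, mr, rfl⟩
    have hadj : pvAdjOK "(" m0 = true := (List.isChain_cons_cons.mp hC).1
    rcases adjOK_cases hadj with ⟨hk, _⟩ | ⟨_, hm⟩
    · simp [pvTokKind] at hk
    · simp only [pvHeadOK]
      rcases hm with hm | hm <;> simp [hm]
  · obtain ⟨m0, x, hmx⟩ := mid.eq_nil_or_concat.resolve_left hmne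
    rw [List.concat_eq_append] at hmx
    subst hmx
    have hadj : pvAdjOK x ")" = true := by
      have := hjun x (by simp) ")" (by simp)
      exact this
    rcases adjOK_cases hadj with ⟨hx, _⟩ | ⟨_, hk⟩
    · rw [lastOK_concat]
      rcases hx with hx | hx <;> simp [hx]
    · simp [pvTokKind] at hk
  · simp only [List.length_append, List.length_cons]; omega

theorem t1_main : ∀ (n : Nat) (ts : List String), ts.length ≤ n → Pre_parse_and_normalize ts →
    ((∃ c, PD 2 ts c) ∧
     (pvSfind "OR" ts 0 = none → ∃ c, PD 1 ts c) ∧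
     (pvSfind "OR" ts 0 = none → pvSfind "AND" ts 0 = none → ∃ c, PD 0 ts c)) := by
  intro n
  induction n with
  | zero =>
    intro ts hl hg
    exact absurd (List.length_eq_zero_iff.mp (Nat.le_zero.mp hl)) hg.1
  | succ n ih =>
    intro ts hlen hg
    have h0 : pvSfind "OR" ts 0 = none → pvSfind "AND" ts 0 = none → ∃ c, PD 0 ts c := by
      intro hnO hnA
      rcases hlen2 : ts.length with _ | _ | m
      · exact absurd (List.length_eq_zero_iff.mp hlen2) hg.1
      · -- single token: a course name
        obtain ⟨t, rfl⟩ := List.length_eq_one_iff.mp hlen2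
        have hk1 : pvTokKind t = 0 ∨ pvTokKind t = 2 := by simpa [pvHeadOK] using hg.2.1
        have hk2 : pvTokKind t = 0 ∨ pvTokKind t = 3 := by simpa [pvLastOK] using hg.2.2.1
        have hk : pvTokKind t = 0 := by omega
        exact ⟨[[t]], PD.name t hk⟩
      · obtain ⟨mid, hts, hgm, hlm⟩ := good_paren hg hnA hnO (by omega)
        obtain ⟨c, hc⟩ := (ih mid (by omega) hgm).1
        exact ⟨c, hts ▸ PD.paren hc⟩
    have h1 : pvSfind "OR" ts 0 = none → ∃ c, PD 1 ts c := by
      intro hnO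
      cases hA : pvSfind "AND" ts 0 with
      | none =>
        obtain ⟨c, hc⟩ := h0 hnO hA
        exact ⟨c, PD.atom hc⟩
      | some p =>
        obtain ⟨l, r⟩ := p
        obtain ⟨hts, hgl, hgr, hdl, hrn, hll, hlr⟩ := good_split (by decide) hg hA
        subst hts
        obtain ⟨hOl, hOr'⟩ := sfind_none_split hnO
        rw [hdl] at hOr'
        have hOr : pvSfind "OR" r 0 = none := by
          have := sfind_cons_none hOr'
          simpa [pvDelta] using this
        rw [List.length_append, List.length_cons] at hlen
        obtain ⟨c1, hc1⟩ := (ih l (by omega) hgl).2.1 hOl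
        obtain ⟨c2, hc2⟩ := (ih r (by omega) hgr).2.2 hOr hrn
        exact ⟨c1 ++ c2, PD.acons hc1 hc2⟩
    refine ⟨?_, h1, h0⟩
    cases hO : pvSfind "OR" ts 0 with
    | none =>
      obtain ⟨c, hc⟩ := h1 hO
      exact ⟨c, PD.andE hc⟩
    | some p =>
      obtain ⟨l, r⟩ := p
      obtain ⟨hts, hgl, hgr, hdl, hrn, hll, hlr⟩ := good_split (by decide) hg hO
      subst hts
      rw [List.length_append, List.length_cons] at hlen
      obtain ⟨c1, hc1⟩ := (ih l (by omega) hgl).1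
      obtain ⟨c2, hc2⟩ := (ih r (by omega) hgr).2.1 hrn
      exact ⟨orComb c1 c2, PD.ocons hc1 hc2⟩

theorem t1 {ts : List String} (h : Pre_parse_and_normalize ts) : ∃ c, PD 2 ts c :=
  (t1_main ts.length ts le_rfl h).1

-- ===== VERDICT (by name: the statement is the Claim_ definition above) =====
theorem parse_and_normalize_spec : Claim_equal_parse_and_normalize := by
  intro tokens _ hpre
  unfold Spec_parse_and_normalize
  obtain ⟨c, hc⟩ := t1 hpre
  rw [t3 hc, t2 hc]
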